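-- pv_equiv track=rewrite | github.com/khanhlinh-jnf/Hashiwokakero | main.py | find_subsets_with_sum_k
-- ===== SOURCE A (Python) =====
-- from itertools import combinations
--
-- def find_subsets_with_sum_k(data, k):
--     n = len(data)
--     valid_subsets = []
--     for size in range(1, n + 1):
--         for subset in combinations(data, size):
--             total_weight = sum(item[1] for item in subset)
--             info_set = set(item[0] for item in subset)
--             if len(info_set) == len(subset) and total_weight == k:
--                 valid_subsets.append(subset)
--     return valid_subsets
-- ===== SOURCE B (Python) =====
-- def find_subsets_with_sum_k(data, k):
--     # One DFS builds every subset in lexicographic index order; a final stable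
--     # sort by length reproduces the size-major order of A.
--     def subsets(lst):
--         if not lst:
--             return [()]
--         rest = subsets(lst[1:])
--         return [()] + [(lst[0],) + s for s in rest] + rest[1:]
--
--     res = [s for s in subsets(data)
--            if s and len(set(x[0] for x in s)) == len(s)
--            and sum(x[1] for x in s) == k]
--     res.sort(key=len)
--     return res
-- ===== Notes on version B (the rewrite author's own statement) =====
-- stated objective: alternative
-- what changed: Replaces A's size-by-size sweep over itertools.combinations by a single recursive enumeration of all subsets in lexicographic (DFS) order, filtering once and then stably sorting the survivors by length to reproduce A's size-major order.
import Mathlib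
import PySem

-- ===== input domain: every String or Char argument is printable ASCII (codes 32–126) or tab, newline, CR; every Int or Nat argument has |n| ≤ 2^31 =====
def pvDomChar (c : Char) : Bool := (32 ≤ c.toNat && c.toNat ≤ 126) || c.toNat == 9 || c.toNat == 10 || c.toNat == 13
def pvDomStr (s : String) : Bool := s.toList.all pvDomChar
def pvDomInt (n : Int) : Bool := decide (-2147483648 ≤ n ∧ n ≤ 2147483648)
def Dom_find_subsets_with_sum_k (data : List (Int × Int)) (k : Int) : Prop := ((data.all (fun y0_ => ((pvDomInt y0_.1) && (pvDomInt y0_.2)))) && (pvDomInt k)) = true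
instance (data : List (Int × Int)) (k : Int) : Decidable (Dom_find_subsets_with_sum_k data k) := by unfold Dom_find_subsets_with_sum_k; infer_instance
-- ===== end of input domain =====

-- B replaces A's size-by-size sweep over itertools.combinations by ONE recursive
-- enumeration of all subsets in lexicographic order followed by a stable sort by
-- length (objective: alternative decomposition, same exact output).

-- ===== PORT A =====
-- itertools.combinations(data, size) in itertools' order
def pvCombs : Nat → List (Int × Int) → List (List (Int × Int))
  | 0, _ => [[]]
  | _ + 1, [] => []
  | s + 1, x :: xs => (pvCombs s xs).map (fun t => x :: t) ++ pvCombs (s + 1) xs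

-- range(1, n+1) is List.range' 1 n (all values are nonnegative)
def find_subsets_with_sum_k (data : List (Int × Int)) (k : Int) : List (List (Int × Int)) :=
  (List.range' 1 data.length).foldl (fun acc size =>
    (pvCombs size data).foldl (fun acc2 subset =>
      if (PySem.Set.ofList (subset.map Prod.fst)).length == subset.length
          && (subset.map Prod.snd).sum == k
      then acc2 ++ [subset] else acc2) acc) []

-- ===== PORT B =====
-- Source B's `subsets`: all subsets of lst in lexicographic (DFS) order, [] first
def pvAllSubs : List (Int × Int) → List (List (Int × Int))
  | [] => [[]]
  | x :: xs =>
    let rest := pvAllSubs xs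
    [] :: ((rest.map (fun s => x :: s)) ++ rest.tail)

def find_subsets_with_sum_k_alt (data : List (Int × Int)) (k : Int) : List (List (Int × Int)) :=
  let res := (pvAllSubs data).filter (fun s =>
    !s.isEmpty
      && ((PySem.Set.ofList (s.map Prod.fst)).length == s.length
            && (s.map Prod.snd).sum == k))
  PySem.List.sorted res (fun s => s.length) false

-- ===== PRECONDITION & SPEC =====
def Spec_find_subsets_with_sum_k (data : List (Int × Int)) (k : Int) (out : List (List (Int × Int))) : Prop := out = find_subsets_with_sum_k_alt data k
instance (data : List (Int × Int)) (k : Int) (out : List (List (Int × Int))) : Decidable (Spec_find_subsets_with_sum_k data k out) := by unfold Spec_find_subsets_with_sum_k; infer_instance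

-- ===== CLAIM (what is proved, stated in full; the proofs are below) =====
def Claim_equal_find_subsets_with_sum_k : Prop := ∀ (data : List (Int × Int)) (k : Int), Dom_find_subsets_with_sum_k data k → Spec_find_subsets_with_sum_k data k (find_subsets_with_sum_k data k)

-- ===== LEMMAS AND PROOFS =====

theorem insertBy_append_of_not_before {α : Type} (before : α → α → Bool) (x : α)
    (g r : List α) (h : ∀ y ∈ g, before x y = false) :
    PySem.List.insertBy before x (g ++ r) = g ++ PySem.List.insertBy before x r := by
  induction g with
  | nil => simp
  | cons y ys ih =>
    simp only [List.cons_append, PySem.List.insertBy, h y (by simp)]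
    simp only [Bool.false_eq_true, if_false, List.cons.injEq, true_and]
    exact ih (fun z hz => h z (by simp [hz]))

theorem insertBy_of_forall_before {α : Type} (before : α → α → Bool) (x : α)
    (r : List α) (h : ∀ y ∈ r, before x y = true) :
    PySem.List.insertBy before x r = x :: r := by
  cases r with
  | nil => rfl
  | cons y ys => simp [PySem.List.insertBy, h y (by simp)]

theorem mem_pvAllSubs_length (l : List (Int × Int)) (s : List (Int × Int))
    (h : s ∈ pvAllSubs l) : s.length ≤ l.length := by
  induction l generalizing s with
  | nil => simp [pvAllSubs] at h; simp [h]
  | cons x xs ih =>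
    simp only [pvAllSubs, List.mem_cons, List.mem_append, List.mem_map] at h
    rcases h with h | ⟨t, ht, rfl⟩ | h
    · simp [h]
    · simpa using Nat.succ_le_succ (ih t ht)
    · exact Nat.le_succ_of_le (ih s (List.mem_of_mem_tail h))

theorem pvAllSubs_eq_cons (l : List (Int × Int)) :
    pvAllSubs l = [] :: (pvAllSubs l).tail := by
  cases l <;> rfl

theorem pvAllSubs_filter_len (l : List (Int × Int)) (m : Nat) :
    (pvAllSubs l).filter (fun s => s.length == m) = pvCombs m l := by
  induction l generalizing m with
  | nil =>
    cases m <;> simp [pvAllSubs, pvCombs]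
  | cons x xs ih =>
    cases m with
    | zero =>
      have h0 : (pvAllSubs xs).filter (fun s => s.length == 0) = [[]] := by
        simpa [pvCombs] using ih 0
      have h0t : ((pvAllSubs xs).tail.filter (fun s => s.length == 0)) = [] := by
        have := h0
        rw [pvAllSubs_eq_cons xs] at this
        simpa using this
      simp [pvAllSubs, pvCombs, List.filter_append, List.filter_map, h0t,
        Function.comp]
    | succ s =>
      have hm : ((pvAllSubs xs).map (fun t => x :: t)).filter
          (fun t => t.length == s + 1) =
          ((pvAllSubs xs).filter (fun t => t.length == s)).map (fun t => x :: t) := by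
        rw [List.filter_map]
        congr 1
        apply List.filter_congr
        intro t _
        simp
      have ht : (pvAllSubs xs).tail.filter (fun t => t.length == s + 1) =
          (pvAllSubs xs).filter (fun t => t.length == s + 1) := by
        conv_rhs => rw [pvAllSubs_eq_cons xs]
        simp
      simp only [pvAllSubs, pvCombs, List.filter_cons, List.filter_append]
      simp [hm, ht, ih]

theorem ins_groups (a n : Nat) (G : Nat → List (List (Int × Int))) (x : List (Int × Int))
    (hG : ∀ m, ∀ s ∈ G m, s.length = m) (h1 : a ≤ x.length) (h2 : x.length < a + n) :
    PySem.List.insertBy (fun p q => decide (p.length < q.length)) x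
        (((List.range' a n).map G).flatten) =
      (((List.range' a n).map (fun m => G m ++ if x.length == m then [x] else [])).flatten) := by
  induction n generalizing a with
  | zero => omega
  | succ n ih =>
    rw [List.range'_succ]
    simp only [List.map_cons, List.flatten_cons]
    by_cases hx : x.length = a
    · have hskip : ∀ y ∈ G a, (decide (x.length < y.length)) = false := by
        intro y hy; simp [hG a y hy, hx]
      rw [insertBy_append_of_not_before _ _ _ _ hskip]
      have hall : ∀ y ∈ ((List.range' (a+1) n).map G).flatten,
          (decide (x.length < y.length)) = true := by
        intro y hy
        simp only [List.mem_flatten, List.mem_map] at hy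
        obtain ⟨g, ⟨m, hm, rfl⟩, hyg⟩ := hy
        have := hG m y hyg
        have hm' := List.mem_range'_1.mp hm
        simp [this, hx]; omega
      rw [insertBy_of_forall_before _ _ _ hall]
      have hrest : (List.range' (a+1) n).map
          (fun m => G m ++ if x.length == m then [x] else []) =
          (List.range' (a+1) n).map G := by
        apply List.map_congr_left
        intro m hm
        have hm' := List.mem_range'_1.mp hm
        have : (x.length == m) = false := by simp [hx]; omega
        simp [this]
      rw [hrest]
      have : (x.length == a) = true := by simp [hx]
      simp [this]
    · have hxa : a < x.length := by omega
      have hskip : ∀ y ∈ G a, (decide (x.length < y.length)) = false := by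
        intro y hy; simp [hG a y hy]; omega
      rw [insertBy_append_of_not_before _ _ _ _ hskip]
      have : (x.length == a) = false := by simp; omega
      rw [ih (a+1) (by omega) (by omega)]
      simp [this]

theorem foldl_ins_groups (n : Nat) (L P : List (List (Int × Int)))
    (hL : ∀ s ∈ L, 1 ≤ s.length ∧ s.length ≤ n) :
    L.foldl (fun acc x =>
        PySem.List.insertBy (fun p q => decide (p.length < q.length)) x acc)
      (((List.range' 1 n).map (fun m => P.filter (fun s => s.length == m))).flatten) =
    (((List.range' 1 n).map (fun m => (P ++ L).filter (fun s => s.length == m))).flatten) := by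
  induction L generalizing P with
  | nil => simp
  | cons x L ih =>
    simp only [List.foldl_cons]
    rw [ins_groups 1 n _ x (by intro m s hs; simpa using (List.mem_filter.mp hs).2)
      (hL x (by simp)).1 (by have := (hL x (by simp)).2; omega)]
    have hre : (List.range' 1 n).map
        (fun m => P.filter (fun s => s.length == m) ++ if x.length == m then [x] else []) =
        (List.range' 1 n).map (fun m => (P ++ [x]).filter (fun s => s.length == m)) := by
      apply List.map_congr_left
      intro m _
      by_cases h : x.length = m <;> simp [List.filter_append, h]
    rw [hre, ih (P ++ [x]) (fun s hs => hL s (by simp [hs]))]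
    simp

theorem sorted_len_groups (n : Nat) (L : List (List (Int × Int)))
    (hL : ∀ s ∈ L, 1 ≤ s.length ∧ s.length ≤ n) :
    PySem.List.sorted L (fun s => s.length) false =
      (((List.range' 1 n).map (fun m => L.filter (fun s => s.length == m))).flatten) := by
  rw [PySem.List.sorted_eq_foldl_insertBy]
  have := foldl_ins_groups n L [] hL
  simpa using this

theorem find_subsets_with_sum_k_spec' (data : List (Int × Int)) (k : Int) :
    find_subsets_with_sum_k data k = find_subsets_with_sum_k_alt data k := by
  have Q : List (Int × Int) → Bool := fun s =>
    (PySem.Set.ofList (s.map Prod.fst)).length == s.length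
      && (s.map Prod.snd).sum == k
  -- A side: nested conditional appends become flatMap of filters
  have hA : find_subsets_with_sum_k data k =
      ((List.range' 1 data.length).map
        (fun m => (pvCombs m data).filter (fun s =>
          (PySem.Set.ofList (s.map Prod.fst)).length == s.length
            && (s.map Prod.snd).sum == k))).flatten := by
    unfold find_subsets_with_sum_k
    simp only [PySem.List.foldl_append_if _ (fun s => s)]
    rw [PySem.List.foldl_append_eq_flatMap]
    simp [List.flatMap_def]
  -- B side: stable sort by length is the length-grouped flatten
  have hB : find_subsets_with_sum_k_alt data k =
      ((List.range' 1 data.length).map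
        (fun m => ((pvAllSubs data).filter (fun s =>
          !s.isEmpty
            && ((PySem.Set.ofList (s.map Prod.fst)).length == s.length
                  && (s.map Prod.snd).sum == k))).filter
            (fun s => s.length == m))).flatten := by
    unfold find_subsets_with_sum_k_alt
    apply sorted_len_groups
    intro s hs
    have hmem := List.mem_filter.mp hs
    have hne : s ≠ [] := by
      have := hmem.2
      simp only [Bool.and_eq_true, Bool.not_eq_true'] at this
      exact fun h => by simp [h] at this
    constructor
    · cases s with
      | nil => exact absurd rfl hne
      | cons a t => simp
    · exact mem_pvAllSubs_length data s hmem.1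
  rw [hA, hB]
  congr 1
  apply List.map_congr_left
  intro m hm
  have hm1 : 1 ≤ m := (List.mem_range'_1.mp hm).1
  rw [← pvAllSubs_filter_len data m]
  rw [List.filter_filter, List.filter_filter]
  apply List.filter_congr
  intro s _
  by_cases h : s.length = m
  · have hne : ¬ s.isEmpty := by
      cases s with
      | nil => simp at h; omega
      | cons a t => simp
    simp [h, hne]
  · have hf : (s.length == m) = false := by simp [h]
    simp [hf]

-- ===== VERDICT (by name: the statement is the Claim_ definition above) =====
theorem find_subsets_with_sum_k_spec : Claim_equal_find_subsets_with_sum_k := by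
  intro data k _
  unfold Spec_find_subsets_with_sum_k
  exact find_subsets_with_sum_k_spec' data k
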